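-- pv_equiv track=rewrite | github.com/kanonn/iot-generate_diagram | generate_docs_with_diagrams.py | categorize_resources
-- ===== SOURCE A (Python) =====
-- def categorize_resources(resources):
--     categories = {
--         'Network': [], 'Compute': [], 'Database': [], 'Storage': [],
--         'Integration': [], 'Security': [], 'Management': [], 'Other': []
--     }
--     category_map = {
--         'AWS::EC2::VPC': 'Network', 'AWS::EC2::Subnet': 'Network',
--         'AWS::EC2::InternetGateway': 'Network', 'AWS::EC2::SecurityGroup': 'Security',
--         'AWS::Lambda::Function': 'Compute', 'AWS::RDS::DBInstance': 'Database',
--         'AWS::S3::Bucket': 'Storage', 'AWS::EFS::FileSystem': 'Storage',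
--         'AWS::EFS::MountTarget': 'Storage', 'AWS::EFS::AccessPoint': 'Storage',
--         'AWS::Backup::BackupVault': 'Storage', 'AWS::Backup::BackupPlan': 'Storage',
--         'AWS::IAM::Role': 'Security', 'AWS::Logs::LogGroup': 'Management',
--         'AWS::Logs::MetricFilter': 'Management',
--     }
--     for resource_id, resource_data in resources.items():
--         resource_type = resource_data.get('Type', '')
--         category = category_map.get(resource_type, 'Other')
--         categories[category].append((resource_id, resource_data, resource_type))
--     return {k: v for k, v in categories.items() if v}
-- ===== SOURCE B (Python) =====
-- def categorize_resources(resources):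
--     category_map = {
--         'AWS::EC2::VPC': 'Network', 'AWS::EC2::Subnet': 'Network',
--         'AWS::EC2::InternetGateway': 'Network', 'AWS::EC2::SecurityGroup': 'Security',
--         'AWS::Lambda::Function': 'Compute', 'AWS::RDS::DBInstance': 'Database',
--         'AWS::S3::Bucket': 'Storage', 'AWS::EFS::FileSystem': 'Storage',
--         'AWS::EFS::MountTarget': 'Storage', 'AWS::EFS::AccessPoint': 'Storage',
--         'AWS::Backup::BackupVault': 'Storage', 'AWS::Backup::BackupPlan': 'Storage',
--         'AWS::IAM::Role': 'Security', 'AWS::Logs::LogGroup': 'Management',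
--         'AWS::Logs::MetricFilter': 'Management',
--     }
--     category_names = ['Network', 'Compute', 'Database', 'Storage',
--                       'Integration', 'Security', 'Management', 'Other']
--     result = {}
--     for name in category_names:
--         group = [(rid, rdata, rdata.get('Type', ''))
--                  for rid, rdata in resources.items()
--                  if category_map.get(rdata.get('Type', ''), 'Other') == name]
--         if group:
--             result[name] = group
--     return result
-- ===== Notes on version B (the rewrite author's own statement) =====
-- stated objective: alternative
-- what changed: Instead of a single pass appending into eight pre-seeded buckets and then filtering the empty ones, B loops over the ordered category names and for each one collects the matching resources with a comprehension, adding the category to the result only if its group is non-empty.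
import Mathlib
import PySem

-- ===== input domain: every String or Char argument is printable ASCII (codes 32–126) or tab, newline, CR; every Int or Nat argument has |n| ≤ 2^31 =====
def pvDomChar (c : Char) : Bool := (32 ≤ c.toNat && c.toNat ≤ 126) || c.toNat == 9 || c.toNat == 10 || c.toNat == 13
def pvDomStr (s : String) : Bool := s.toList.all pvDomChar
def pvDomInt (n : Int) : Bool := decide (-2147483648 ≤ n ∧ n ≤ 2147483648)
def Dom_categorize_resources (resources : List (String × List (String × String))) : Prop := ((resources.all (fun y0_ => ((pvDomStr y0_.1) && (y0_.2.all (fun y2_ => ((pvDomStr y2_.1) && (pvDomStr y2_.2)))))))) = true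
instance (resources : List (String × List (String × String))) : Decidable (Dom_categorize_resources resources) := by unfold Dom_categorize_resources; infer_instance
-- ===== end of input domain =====

-- B groups by looping over the ordered category names and collecting each group in one scan,
-- instead of A's single pass that appends into eight pre-seeded buckets; alternative decomposition, same result.

-- shared literal constant: the category_map dict both Pythons define verbatim
def pvCategoryMap : PySem.Dict String String := PySem.Dict.mk
  [("AWS::EC2::VPC", "Network"), ("AWS::EC2::Subnet", "Network"),
   ("AWS::EC2::InternetGateway", "Network"), ("AWS::EC2::SecurityGroup", "Security"),
   ("AWS::Lambda::Function", "Compute"), ("AWS::RDS::DBInstance", "Database"),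
   ("AWS::S3::Bucket", "Storage"), ("AWS::EFS::FileSystem", "Storage"),
   ("AWS::EFS::MountTarget", "Storage"), ("AWS::EFS::AccessPoint", "Storage"),
   ("AWS::Backup::BackupVault", "Storage"), ("AWS::Backup::BackupPlan", "Storage"),
   ("AWS::IAM::Role", "Security"), ("AWS::Logs::LogGroup", "Management"),
   ("AWS::Logs::MetricFilter", "Management")]

-- resource_data.get('Type', '')
def pvTypeOf (rdata : List (String × String)) : String := (PySem.Dict.mk rdata).getD "Type" ""

-- ===== PORT A =====
-- categories[category].append(...) on the assoc list behind the categories dict; the key is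
-- always present (Python would raise KeyError otherwise, which never happens here since every
-- category_map value and the 'Other' default are seeded keys), so the hand port returns the
-- list unchanged on the unreachable missing-key case.
def pvAppendAt (cats : List (String × List (String × (List (String × String)) × String)))
    (k : String) (x : String × (List (String × String)) × String) :
    List (String × List (String × (List (String × String)) × String)) :=
  match cats with
  | [] => []
  | (k', v) :: rest => if k' == k then (k', v ++ [x]) :: rest else (k', v) :: pvAppendAt rest k x

def categorize_resources (resources : List (String × List (String × String))) : List (String × List (String × (List (String × String)) × String)) :=
  let categories0 : List (String × List (String × (List (String × String)) × String)) :=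
    [("Network", []), ("Compute", []), ("Database", []), ("Storage", []),
     ("Integration", []), ("Security", []), ("Management", []), ("Other", [])]
  let categories := resources.foldl (fun cats r =>
    let rtype := pvTypeOf r.2
    let category := pvCategoryMap.getD rtype "Other"
    pvAppendAt cats category (r.1, r.2, rtype)) categories0
  categories.filter (fun kv => !kv.2.isEmpty)

-- ===== PORT B =====
def pvCatNames : List String :=
  ["Network", "Compute", "Database", "Storage", "Integration", "Security", "Management", "Other"]

def categorize_resources_alt (resources : List (String × List (String × String))) : List (String × List (String × (List (String × String)) × String)) :=
  pvCatNames.foldl (fun acc name =>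
    let group := (resources.filter (fun r => pvCategoryMap.getD (pvTypeOf r.2) "Other" == name)).map
      (fun r => (r.1, r.2, pvTypeOf r.2))
    if group.isEmpty then acc else acc ++ [(name, group)]) []

-- ===== PRECONDITION & SPEC =====
def Spec_categorize_resources (resources : List (String × List (String × String))) (out : List (String × List (String × (List (String × String)) × String))) : Prop := out = categorize_resources_alt resources
instance (resources : List (String × List (String × String))) (out : List (String × List (String × (List (String × String)) × String))) : Decidable (Spec_categorize_resources resources out) := by
  unfold Spec_categorize_resources
  exact @List.hasDecEq _
    (@instDecidableEqProd _ _ _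
      (@List.hasDecEq _
        (@instDecidableEqProd _ _ _
          (@instDecidableEqProd _ _ (@List.hasDecEq _ inferInstance) inferInstance)))) out _

-- ===== CLAIM (what is proved, stated in full; the proofs are below) =====
def Claim_equal_categorize_resources : Prop := ∀ (resources : List (String × List (String × String))), Dom_categorize_resources resources → Spec_categorize_resources resources (categorize_resources resources)

-- ===== LEMMAS AND PROOFS =====

def pvGrp (resources : List (String × List (String × String))) (name : String) :
    List (String × (List (String × String)) × String) :=
  (resources.filter (fun r => pvCategoryMap.getD (pvTypeOf r.2) "Other" == name)).map
    (fun r => (r.1, r.2, pvTypeOf r.2))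

lemma pvCat_cases (t : String) :
    pvCategoryMap.getD t "Other" = "Network" ∨ pvCategoryMap.getD t "Other" = "Compute" ∨
    pvCategoryMap.getD t "Other" = "Database" ∨ pvCategoryMap.getD t "Other" = "Storage" ∨
    pvCategoryMap.getD t "Other" = "Integration" ∨ pvCategoryMap.getD t "Other" = "Security" ∨
    pvCategoryMap.getD t "Other" = "Management" ∨ pvCategoryMap.getD t "Other" = "Other" := by
  rcases h : pvCategoryMap.get? t with _ | v
  · simp [PySem.Dict.getD_eq_get?_getD, h]
  · have hm := PySem.Dict.mem_items_of_get?_eq_some _ h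
    rw [PySem.Dict.getD_eq_get?_getD, h]
    simp only [pvCategoryMap, List.mem_cons, List.not_mem_nil, or_false, Prod.mk.injEq] at hm
    rcases hm with ⟨_,rfl⟩|⟨_,rfl⟩|⟨_,rfl⟩|⟨_,rfl⟩|⟨_,rfl⟩|⟨_,rfl⟩|⟨_,rfl⟩|⟨_,rfl⟩|⟨_,rfl⟩|⟨_,rfl⟩|⟨_,rfl⟩|⟨_,rfl⟩|⟨_,rfl⟩|⟨_,rfl⟩|⟨_,rfl⟩ <;> simp

lemma pvGrp_cons (p : String × List (String × String)) (rs : List (String × List (String × String)))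
    (name : String) :
    pvGrp (p :: rs) name =
      (if pvCategoryMap.getD (pvTypeOf p.2) "Other" == name then [(p.1, p.2, pvTypeOf p.2)] else []) ++
        pvGrp rs name := by
  by_cases h : pvCategoryMap.getD (pvTypeOf p.2) "Other" == name <;>
    simp [pvGrp, h]

lemma pvFoldA (rs : List (String × List (String × String)))
    (v1 v2 v3 v4 v5 v6 v7 v8 : List (String × (List (String × String)) × String)) :
    rs.foldl (fun cats r => pvAppendAt cats (pvCategoryMap.getD (pvTypeOf r.2) "Other") (r.1, r.2, pvTypeOf r.2))
      [("Network", v1), ("Compute", v2), ("Database", v3), ("Storage", v4),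
       ("Integration", v5), ("Security", v6), ("Management", v7), ("Other", v8)] =
      [("Network", v1 ++ pvGrp rs "Network"), ("Compute", v2 ++ pvGrp rs "Compute"),
       ("Database", v3 ++ pvGrp rs "Database"), ("Storage", v4 ++ pvGrp rs "Storage"),
       ("Integration", v5 ++ pvGrp rs "Integration"), ("Security", v6 ++ pvGrp rs "Security"),
       ("Management", v7 ++ pvGrp rs "Management"), ("Other", v8 ++ pvGrp rs "Other")] := by
  induction rs generalizing v1 v2 v3 v4 v5 v6 v7 v8 with
  | nil => simp [pvGrp]
  | cons p rs ih =>
    rw [List.foldl_cons]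
    rcases pvCat_cases (pvTypeOf p.2) with h | h | h | h | h | h | h | h <;>
      · simp only [h, pvAppendAt, String.reduceBEq, beq_self_eq_true, if_true, if_false,
          Bool.false_eq_true]
        rw [ih]
        simp [pvGrp_cons, h, List.append_assoc]

lemma pvFoldB (rs : List (String × List (String × String))) (names : List String)
    (acc : List (String × List (String × (List (String × String)) × String))) :
    names.foldl (fun acc name =>
        if (pvGrp rs name).isEmpty then acc else acc ++ [(name, pvGrp rs name)]) acc =
      acc ++ (names.filter (fun n => !(pvGrp rs n).isEmpty)).map (fun n => (n, pvGrp rs n)) := by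
  induction names generalizing acc with
  | nil => simp
  | cons n names ih =>
    rw [List.foldl_cons, List.filter_cons]
    by_cases h : (pvGrp rs n).isEmpty
    · rw [if_pos h, ih]; simp [h]
    · rw [if_neg h, ih]; simp [h, List.append_assoc]

-- ===== VERDICT (by name: the statement is the Claim_ definition above) =====
theorem categorize_resources_spec : Claim_equal_categorize_resources := by
  intro resources _
  unfold Spec_categorize_resources
  simp only [categorize_resources, categorize_resources_alt]
  rw [show (fun (acc : List (String × List (String × (List (String × String)) × String))) (name : String) =>
        if ((resources.filter (fun r => pvCategoryMap.getD (pvTypeOf r.2) "Other" == name)).map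
            (fun r => (r.1, r.2, pvTypeOf r.2))).isEmpty then acc
        else acc ++ [(name, (resources.filter (fun r => pvCategoryMap.getD (pvTypeOf r.2) "Other" == name)).map
            (fun r => (r.1, r.2, pvTypeOf r.2)))]) =
      (fun acc name => if (pvGrp resources name).isEmpty then acc
        else acc ++ [(name, pvGrp resources name)]) from rfl]
  rw [pvFoldA, pvFoldB]
  rw [show [("Network", ([] : List (String × (List (String × String)) × String)) ++ pvGrp resources "Network"),
       ("Compute", [] ++ pvGrp resources "Compute"), ("Database", [] ++ pvGrp resources "Database"),
       ("Storage", [] ++ pvGrp resources "Storage"), ("Integration", [] ++ pvGrp resources "Integration"),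
       ("Security", [] ++ pvGrp resources "Security"), ("Management", [] ++ pvGrp resources "Management"),
       ("Other", [] ++ pvGrp resources "Other")] =
      pvCatNames.map (fun n => (n, pvGrp resources n)) from by simp [pvCatNames]]
  rw [List.filter_map]
  simp only [Function.comp_def, List.nil_append]
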